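-- pv_equiv track=rewrite | github.com/letuananh/omwtk | omwtk/nmc_patch_cfromcto.py | smart_search
-- ===== SOURCE A (Python) =====
-- def smart_search(word_text, sent_text, sid, cfrom):
--     loc = sent_text.find(word_text, cfrom)
--     if loc < 0 and word_text == "not":
--         if sid == 10265:
--             return smart_search("Don't", sent_text, sid, cfrom)
--         elif sid == 10372:
--             return smart_search("Won't", sent_text, sid, cfrom)
--         elif sid == 10395:
--             return smart_search("isn't", sent_text, sid, cfrom)
--         elif sid in (10400, 10414):
--             return smart_search("don't", sent_text, sid, cfrom)
--     if loc < 0 and word_text == 'You' and sid == 10392: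
--         return smart_search("you", sent_text, sid, cfrom)
--     if loc < 0 and word_text == "Will":
--         return smart_search("Won't", sent_text, sid, cfrom)
--     else:
--         return loc
-- ===== SOURCE B (Python) =====
-- # Rule table: (word, applicable sids or None for any sid, replacement)
-- RULES = [
--     ("not", (10265,), "Don't"),
--     ("not", (10372,), "Won't"),
--     ("not", (10395,), "isn't"),
--     ("not", (10400, 10414), "don't"),
--     ("You", (10392,), "you"),
--     ("Will", None, "Won't"),
-- ]
--
--
-- def smart_search(word_text, sent_text, sid, cfrom):
--     # Build the list of candidate search strings (the word itself plus any
--     # applicable fallback), search for each, and return the first hit,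
--     # falling back to the last (negative) search result.
--     candidates = [word_text] + [r for w, sids, r in RULES
--                                 if w == word_text and (sids is None or sid in sids)]
--     locs = [sent_text.find(c, cfrom) for c in candidates]
--     for loc in locs:
--         if loc >= 0:
--             return loc
--     return locs[-1]
-- ===== Notes on version B (the rewrite author's own statement) =====
-- stated objective: simpler
-- what changed: Replaces A's self-recursive if/elif cascade by a data-driven pipeline: build the candidate list (word plus applicable rule-table fallbacks), map find over it, and return the first non-negative location else the last one.
import Mathlib
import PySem

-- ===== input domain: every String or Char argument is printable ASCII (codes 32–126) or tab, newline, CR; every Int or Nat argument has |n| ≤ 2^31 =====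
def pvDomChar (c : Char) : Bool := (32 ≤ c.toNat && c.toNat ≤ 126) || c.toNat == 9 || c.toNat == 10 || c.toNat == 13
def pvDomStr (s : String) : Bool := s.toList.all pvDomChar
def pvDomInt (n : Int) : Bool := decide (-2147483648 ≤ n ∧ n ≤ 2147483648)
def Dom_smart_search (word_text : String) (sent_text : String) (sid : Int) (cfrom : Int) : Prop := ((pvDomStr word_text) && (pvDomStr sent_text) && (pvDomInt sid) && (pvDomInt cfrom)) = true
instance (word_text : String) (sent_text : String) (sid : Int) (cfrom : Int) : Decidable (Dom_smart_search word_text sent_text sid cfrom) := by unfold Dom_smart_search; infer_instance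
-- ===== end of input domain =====

-- B replaces A's self-recursive if/elif cascade by a data-driven pipeline: build the candidate
-- list from a rule table, map find over it, return the first non-negative location else the last
-- (objective: simpler).

-- ===== PORT A =====
-- termination measure: the three fallback-triggering words have rank 1, everything else rank 0
def pvRank (w : String) : Nat := if w = "not" ∨ w = "You" ∨ w = "Will" then 1 else 0

def smart_search (word_text : String) (sent_text : String) (sid : Int) (cfrom : Int) : Int :=
  let loc := PySem.Str.findFrom sent_text word_text cfrom
  if loc < 0 ∧ word_text = "not" then
    if sid = 10265 then smart_search "Don't" sent_text sid cfrom
    else if sid = 10372 then smart_search "Won't" sent_text sid cfrom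
    else if sid = 10395 then smart_search "isn't" sent_text sid cfrom
    else if sid = 10400 ∨ sid = 10414 then smart_search "don't" sent_text sid cfrom
    else
      -- fall through to the remaining two ifs, exactly as in Python
      if loc < 0 ∧ word_text = "You" ∧ sid = 10392 then smart_search "you" sent_text sid cfrom
      else if loc < 0 ∧ word_text = "Will" then smart_search "Won't" sent_text sid cfrom
      else loc
  else
    if loc < 0 ∧ word_text = "You" ∧ sid = 10392 then smart_search "you" sent_text sid cfrom
    else if loc < 0 ∧ word_text = "Will" then smart_search "Won't" sent_text sid cfrom
    else loc
termination_by pvRank word_text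
decreasing_by all_goals simp_all [pvRank]

-- ===== PORT B =====
-- the rule table: (word, applicable sids or none for any sid, replacement), as in Source B
def pvRules : List (String × Option (List Int) × String) :=
  [("not", some [10265], "Don't"), ("not", some [10372], "Won't"),
   ("not", some [10395], "isn't"), ("not", some [10400, 10414], "don't"),
   ("You", some [10392], "you"), ("Will", none, "Won't")]

-- the rule-applicability test of Source B's list comprehension
def pvApplies (word_text : String) (sid : Int) (r : String × Option (List Int) × String) : Bool :=
  r.1 == word_text && (match r.2.1 with | none => true | some sids => sids.contains sid)

-- the final for-loop of Source B: first element ≥ 0, else the last element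
def pvFirstNonnegOrLast : List Int → Int
  | [] => -1              -- unreachable: the list always contains word_text's own result
  | [l] => l
  | l :: l' :: rest => if l ≥ 0 then l else pvFirstNonnegOrLast (l' :: rest)

def smart_search_alt (word_text : String) (sent_text : String) (sid : Int) (cfrom : Int) : Int :=
  let candidates := word_text :: (pvRules.filter (pvApplies word_text sid)).map (fun r => r.2.2)
  let locs := candidates.map (fun c => PySem.Str.findFrom sent_text c cfrom)
  pvFirstNonnegOrLast locs

-- ===== PRECONDITION & SPEC =====
def Spec_smart_search (word_text : String) (sent_text : String) (sid : Int) (cfrom : Int) (out : Int) : Prop := out = smart_search_alt word_text sent_text sid cfrom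
instance (word_text : String) (sent_text : String) (sid : Int) (cfrom : Int) (out : Int) : Decidable (Spec_smart_search word_text sent_text sid cfrom out) := by unfold Spec_smart_search; infer_instance

-- ===== CLAIM (what is proved, stated in full; the proofs are below) =====
def Claim_equal_smart_search : Prop := ∀ (word_text : String) (sent_text : String) (sid : Int) (cfrom : Int), Dom_smart_search word_text sent_text sid cfrom → Spec_smart_search word_text sent_text sid cfrom (smart_search word_text sent_text sid cfrom)

-- ===== LEMMAS AND PROOFS =====
-- a replacement word triggers no fallback of its own, so A's recursive call is a plain find
theorem smart_search_base (w s : String) (sid cfrom : Int)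
    (h1 : w ≠ "not") (h2 : w ≠ "You") (h3 : w ≠ "Will") :
    smart_search w s sid cfrom = PySem.Str.findFrom s w cfrom := by
  rw [smart_search]
  simp [h1, h2, h3]

-- B with exactly one applicable rule: retry with the replacement when the word is not found
theorem alt_two (w repl s : String) (sid cfrom : Int)
    (hc : (pvRules.filter (pvApplies w sid)).map (fun r => r.2.2) = [repl]) :
    smart_search_alt w s sid cfrom =
      if PySem.Str.findFrom s w cfrom ≥ 0 then PySem.Str.findFrom s w cfrom
      else PySem.Str.findFrom s repl cfrom := by
  unfold smart_search_alt
  rw [hc]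
  simp only [List.map_cons, List.map_nil, pvFirstNonnegOrLast]

-- B with no applicable rule: just the plain find
theorem alt_zero (w s : String) (sid cfrom : Int)
    (hc : pvRules.filter (pvApplies w sid) = []) :
    smart_search_alt w s sid cfrom = PySem.Str.findFrom s w cfrom := by
  unfold smart_search_alt
  rw [hc]
  simp only [List.map_nil, List.map_cons, pvFirstNonnegOrLast]

-- B when the word itself is found: the loop returns the first location immediately
theorem alt_head_nonneg (w s : String) (sid cfrom : Int)
    (h : PySem.Str.findFrom s w cfrom ≥ 0) :
    smart_search_alt w s sid cfrom = PySem.Str.findFrom s w cfrom := by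
  unfold smart_search_alt
  simp only [List.map_cons]
  generalize (List.map (fun c => PySem.Str.findFrom s c cfrom)
      (List.map (fun r => r.2.2) (pvRules.filter (pvApplies w sid)))) = X
  cases X with
  | nil => rw [pvFirstNonnegOrLast]
  | cons a t =>
      rw [pvFirstNonnegOrLast, if_pos (by simpa using h)]

theorem smart_search_eq_alt (w s : String) (sid cfrom : Int) :
    smart_search w s sid cfrom = smart_search_alt w s sid cfrom := by
  by_cases hloc : PySem.Str.findFrom s w cfrom < 0
  · have hge : ¬ PySem.Str.findFrom s w cfrom ≥ 0 := not_le.mpr hloc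
    rw [smart_search]
    by_cases hn : w = "not"
    · subst hn
      by_cases h1 : sid = 10265
      · subst h1
        rw [alt_two "not" "Don't" s 10265 cfrom (by decide)]
        simp_all [smart_search_base]
      · by_cases h2 : sid = 10372
        · subst h2
          rw [alt_two "not" "Won't" s 10372 cfrom (by decide)]
          simp_all [smart_search_base]
        · by_cases h3 : sid = 10395
          · subst h3
            rw [alt_two "not" "isn't" s 10395 cfrom (by decide)]
            simp_all [smart_search_base]
          · by_cases h4 : sid = 10400 ∨ sid = 10414
            · rw [alt_two "not" "don't" s sid cfrom
                (by rcases h4 with h4 | h4 <;> subst h4 <;> decide)]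
              simp_all [smart_search_base]
            · push_neg at h4
              have hc : pvRules.filter (pvApplies "not" sid) = [] := by
                rw [List.filter_eq_nil_iff]
                intro r hr
                fin_cases hr <;> simp_all [pvApplies, eq_comm]
              rw [alt_zero "not" s sid cfrom hc]
              simp_all
    · by_cases hy : w = "You"
      · subst hy
        by_cases hs : sid = 10392
        · subst hs
          rw [alt_two "You" "you" s 10392 cfrom (by decide)]
          simp_all [smart_search_base]
        · have hc : pvRules.filter (pvApplies "You" sid) = [] := by
            rw [List.filter_eq_nil_iff]
            intro r hr
            fin_cases hr <;> simp_all [pvApplies, eq_comm]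
          rw [alt_zero "You" s sid cfrom hc]
          simp_all
      · by_cases hw : w = "Will"
        · subst hw
          have hc : (pvRules.filter (pvApplies "Will" sid)).map (fun r => r.2.2) = ["Won't"] := by
            simp [pvRules, pvApplies]
          rw [alt_two "Will" "Won't" s sid cfrom hc]
          simp_all [smart_search_base]
        · have hc : pvRules.filter (pvApplies w sid) = [] := by
            rw [List.filter_eq_nil_iff]
            intro r hr
            fin_cases hr <;> simp [pvApplies, Ne.symm hn, Ne.symm hy, Ne.symm hw]
          rw [alt_zero w s sid cfrom hc]
          simp_all
  · push_neg at hloc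
    rw [alt_head_nonneg w s sid cfrom hloc, smart_search]
    have h1 : ¬ (PySem.Chars.findFrom s.toList w.toList cfrom < 0) := by
      simpa using not_lt.mpr hloc
    simp [h1]

-- ===== VERDICT (by name: the statement is the Claim_ definition above) =====
theorem smart_search_spec : Claim_equal_smart_search := by
  intro w s sid cfrom _
  unfold Spec_smart_search
  exact smart_search_eq_alt w s sid cfrom
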